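-- pv_equiv track=rewrite | github.com/ThaisLuca/TreeBoostler | boostedrevision.py | node_part_of
-- ===== SOURCE A (Python) =====
-- def node_part_of(path, leaves):
--     if len(leaves) == 0:
--         return False
--     if path == '' and '' in leaves:
--         return True
--     split = path.split(',')
--     for i in range(len(split)):
--         if ','.join(split[:i+1]) in leaves:
--             return True
--     return False
-- ===== SOURCE B (Python) =====
-- def node_part_of(path, leaves):
--     if path in leaves:
--         return True
--     for k, c in enumerate(path):
--         if c == ',' and path[:k] in leaves:
--             return True
--     return False
-- ===== Notes on version B (the rewrite author's own statement) =====
-- stated objective: simpler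
-- what changed: Drops the split/join machinery entirely: B tests the whole path once and scans the characters, slicing path[:k] at each comma index, instead of building a parts list and re-joining a growing prefix for every part.
import Mathlib
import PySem

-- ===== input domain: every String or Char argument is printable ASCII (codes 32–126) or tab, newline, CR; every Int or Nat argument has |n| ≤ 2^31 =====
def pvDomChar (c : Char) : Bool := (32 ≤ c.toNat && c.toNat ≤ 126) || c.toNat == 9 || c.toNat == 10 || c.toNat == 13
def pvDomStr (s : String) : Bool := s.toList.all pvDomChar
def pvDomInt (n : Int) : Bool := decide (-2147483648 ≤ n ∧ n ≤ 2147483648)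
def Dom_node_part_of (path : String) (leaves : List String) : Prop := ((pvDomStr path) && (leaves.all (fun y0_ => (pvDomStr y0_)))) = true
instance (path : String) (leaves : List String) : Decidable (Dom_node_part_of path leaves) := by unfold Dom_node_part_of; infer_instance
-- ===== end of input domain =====

-- B drops A's split/join machinery: it tests the whole path once and then scans the characters,
-- testing the slice path[:k] at each comma index k (simpler; no parts list, no re-joined prefixes).

-- ===== PORT A =====
def node_part_of (path : String) (leaves : List String) : Bool :=
  if leaves.length = 0 then false
  else if path == "" && leaves.contains "" then true
  else
    let split := (PySem.Str.split? path ",").getD []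
    (PySem.List.pyRange 0 split.length 1).any (fun i =>
      leaves.contains (PySem.Str.join "," (PySem.List.slice split none (some (i + 1)))))

-- ===== PORT B =====
def node_part_of_alt (path : String) (leaves : List String) : Bool :=
  if leaves.contains path then true
  else
    (PySem.List.enumerate path.toList).any (fun kc =>
      kc.2 == ',' && leaves.contains (String.ofList (PySem.List.slice path.toList none (some kc.1))))

-- ===== PRECONDITION & SPEC =====
def Spec_node_part_of (path : String) (leaves : List String) (out : Bool) : Prop := out = node_part_of_alt path leaves
instance (path : String) (leaves : List String) (out : Bool) : Decidable (Spec_node_part_of path leaves out) := by unfold Spec_node_part_of; infer_instance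

-- ===== CLAIM (what is proved, stated in full; the proofs are below) =====
def Claim_equal_node_part_of : Prop := ∀ (path : String) (leaves : List String), Dom_node_part_of path leaves → Spec_node_part_of path leaves (node_part_of path leaves)

-- ===== LEMMAS AND PROOFS =====

-- PySem.Chars.splitOn with a single-character separator is Mathlib's List.splitOn.
theorem splitOn_go_single (c : Char) :
    ∀ (l : List Char) (fuel : Nat) (cur : List Char) (acc : List (List Char)),
      l.length ≤ fuel →
      PySem.Chars.splitOn.go [c] fuel l cur acc
        = acc.reverse ++ (l.splitOn c).modifyHead (cur.reverse ++ ·) := by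
  intro l
  induction l with
  | nil =>
    intro fuel cur acc _
    cases fuel <;> simp [PySem.Chars.splitOn.go, List.splitOn, List.splitOnP_nil]
  | cons a rest ih =>
    intro fuel cur acc h
    cases fuel with
    | zero => simp at h
    | succ f =>
      by_cases hc : a = c
      · subst hc
        have : [a].isPrefixOf (a :: rest) = true := by simp [List.isPrefixOf]
        simp only [PySem.Chars.splitOn.go, this, if_pos, List.length_cons, List.length_nil,
          List.drop_succ_cons, List.drop_zero]
        rw [ih f [] (cur.reverse :: acc) (by simpa using Nat.le_of_succ_le_succ h)]
        simp [List.splitOn, List.splitOnP_cons]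
        cases List.splitOnP (fun x => x == a) rest <;> simp
      · have : [c].isPrefixOf (a :: rest) = false := by
          simp [List.isPrefixOf]; exact fun hca => absurd hca.symm hc
        simp only [PySem.Chars.splitOn.go, this, Bool.false_eq_true, if_neg, not_false_iff]
        rw [ih f (a :: cur) acc (Nat.le_of_succ_le_succ h)]
        simp [List.splitOn, List.splitOnP_cons, hc, List.modifyHead_modifyHead]
        cases List.splitOnP (fun x => x == c) rest <;> simp

theorem splitOn_single (s : List Char) (c : Char) :
    PySem.Chars.splitOn s [c] = s.splitOn c := by
  unfold PySem.Chars.splitOn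
  rw [splitOn_go_single c s (s.length + 1) [] [] (by omega)]
  simp [show (fun x : List Char => x) = id from rfl]

-- the list of proper comma-prefixes of P (in left-to-right order)
def commaPrefixes : List Char → List (List Char)
  | [] => []
  | a :: r => (if a = ',' then [[]] else []) ++ (commaPrefixes r).map (a :: ·)

theorem mem_commaPrefixes (P x : List Char) :
    x ∈ commaPrefixes P ↔ ∃ (k : Nat) (h : k < P.length), P[k] = ',' ∧ x = P.take k := by
  induction P generalizing x with
  | nil => simp [commaPrefixes]
  | cons a r ih =>
    constructor
    · intro h
      rcases List.mem_append.1 h with h1 | h2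
      · by_cases hA : a = ','
        · simp [hA] at h1
          exact ⟨0, by simp, by simp [hA], by simp [h1]⟩
        · simp [hA] at h1
      · obtain ⟨y, hy, rfl⟩ := List.mem_map.1 h2
        obtain ⟨k, hk, hc, rfl⟩ := (ih y).1 hy
        exact ⟨k + 1, by simpa using Nat.succ_lt_succ hk, by simpa using hc, by simp⟩
    · rintro ⟨k, hk, hc, rfl⟩
      cases k with
      | zero =>
        apply List.mem_append.2; left
        simp at hc
        simp [hc]
      | succ k =>
        apply List.mem_append.2; right
        refine List.mem_map.2 ⟨r.take k, (ih _).2 ⟨k, by simpa using hk, by simpa using hc, rfl⟩, by simp⟩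

theorem joins_eq (P : List Char) :
    (List.range (P.splitOn ',').length).map
        (fun j => PySem.Chars.join [','] ((P.splitOn ',').take (j + 1)))
      = commaPrefixes P ++ [P] := by
  induction P with
  | nil =>
    simp [List.splitOn, List.splitOnP_nil, commaPrefixes, PySem.Chars.join_singleton]
  | cons a r ih =>
    obtain ⟨x, t, hxt⟩ := List.exists_cons_of_ne_nil (List.splitOnP_ne_nil (fun y => y == ',') r)
    have hsp : r.splitOn ',' = x :: t := by simpa [List.splitOn] using hxt
    by_cases ha : a = ','
    · subst ha
      have hs : (',' :: r).splitOn ',' = [] :: r.splitOn ',' := by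
        simp [List.splitOn, List.splitOnP_cons]
      rw [hs]
      have hg : ∀ j : Nat,
          PySem.Chars.join [','] (([] :: r.splitOn ',').take (j + 1 + 1))
            = ',' :: PySem.Chars.join [','] ((r.splitOn ',').take (j + 1)) := by
        intro j
        rw [hsp]
        simp [PySem.Chars.join_cons_cons]
      calc (List.range ([] :: r.splitOn ',').length).map
              (fun j => PySem.Chars.join [','] (([] :: r.splitOn ',').take (j + 1)))
          = [] :: ((List.range (r.splitOn ',').length).map
              (fun j => PySem.Chars.join [','] ((r.splitOn ',').take (j + 1)))).map (',' :: ·) := by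
            simp only [List.length_cons, List.range_succ_eq_map, List.map_cons, List.map_map]
            refine congrArg₂ _ (by simp [PySem.Chars.join_singleton]) ?_
            refine List.map_congr_left (fun j _ => ?_)
            simpa using hg j
        _ = [] :: (commaPrefixes r ++ [r]).map (',' :: ·) := by rw [ih]
        _ = commaPrefixes (',' :: r) ++ [',' :: r] := by simp [commaPrefixes]
    · have hs : (a :: r).splitOn ',' = (a :: x) :: t := by
        simp [List.splitOn, List.splitOnP_cons, ha]
        simpa [List.splitOn] using congrArg (List.modifyHead (List.cons a)) hsp
      have hg : ∀ j : Nat,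
          PySem.Chars.join [','] (((a :: x) :: t).take (j + 1))
            = a :: PySem.Chars.join [','] ((x :: t).take (j + 1)) := by
        intro j
        cases htj : t.take j with
        | nil => simp only [List.take_succ_cons, htj]; simp [PySem.Chars.join_singleton]
        | cons u v => simp only [List.take_succ_cons, htj]; simp [PySem.Chars.join_cons_cons]
      rw [hs]
      have hlen : ((a :: x) :: t).length = (r.splitOn ',').length := by simp [hsp]
      calc (List.range ((a :: x) :: t).length).map
              (fun j => PySem.Chars.join [','] (((a :: x) :: t).take (j + 1)))
          = ((List.range (r.splitOn ',').length).map
              (fun j => PySem.Chars.join [','] ((r.splitOn ',').take (j + 1)))).map (a :: ·) := by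
            rw [hlen, List.map_map]
            refine List.map_congr_left (fun j _ => ?_)
            simpa [hsp] using hg j
        _ = (commaPrefixes r ++ [r]).map (a :: ·) := by rw [ih]
        _ = commaPrefixes (a :: r) ++ [a :: r] := by simp [commaPrefixes, ha]

theorem join_take_eq (sp : List (List Char)) (m : Nat) :
    PySem.Str.join "," ((sp.map String.ofList).take m)
      = String.ofList (PySem.Chars.join [','] (sp.take m)) := by
  conv_lhs => rw [← String.ofList_toList (s := PySem.Str.join "," ((sp.map String.ofList).take m))]
  rw [PySem.Str.toList_join]
  congr 1
  simp [List.map_take, List.map_map, Function.comp_def, String.toList_ofList]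

theorem split_comma_eq (path : String) :
    (PySem.Str.split? path ",").getD [] = (path.toList.splitOn ',').map String.ofList := by
  have h := PySem.Str.split?_map path ","
  unfold PySem.Chars.split? at h
  cases hO : PySem.Str.split? path "," with
  | none => rw [hO] at h; simp at h
  | some L =>
    rw [hO] at h
    simp at h
    rw [splitOn_single] at h
    simp only [Option.getD_some]
    rw [← h, List.map_map]
    simp [Function.comp_def, String.ofList_toList]

theorem loop_eq (path : String) (leaves : List String) :
    ((PySem.List.pyRange 0 ((path.toList.splitOn ',').map String.ofList).length 1).any (fun i =>
      leaves.contains (PySem.Str.join ","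
        (PySem.List.slice ((path.toList.splitOn ',').map String.ofList) none (some (i + 1))))))
    = (commaPrefixes path.toList ++ [path.toList]).any
        (fun x => leaves.contains (String.ofList x)) := by
  rw [Bool.eq_iff_iff]
  simp only [List.any_eq_true, PySem.List.mem_pyRange_one]
  constructor
  · rintro ⟨i, ⟨h0, hn⟩, hc⟩
    lift i to ℕ using h0
    rw [PySem.List.slice_to _ (by omega)] at hc
    rw [show ((i : ℤ) + 1).toNat = i + 1 from by omega, join_take_eq] at hc
    refine ⟨PySem.Chars.join [','] ((path.toList.splitOn ',').take (i + 1)), ?_, hc⟩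
    rw [← joins_eq]
    refine List.mem_map.2 ⟨i, List.mem_range.2 ?_, rfl⟩
    simpa using hn
  · rintro ⟨x, hx, hc⟩
    rw [← joins_eq] at hx
    obtain ⟨j, hj, rfl⟩ := List.mem_map.1 hx
    refine ⟨(j : ℤ), ⟨by positivity, by simpa using List.mem_range.1 hj⟩, ?_⟩
    rw [PySem.List.slice_to _ (by omega), show ((j : ℤ) + 1).toNat = j + 1 from by omega,
      join_take_eq]
    exact hc

theorem anyB_eq (path : String) (leaves : List String) :
    ((PySem.List.enumerate path.toList).any (fun kc =>
      kc.2 == ',' && leaves.contains (String.ofList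
        (PySem.List.slice path.toList none (some kc.1)))))
    = (commaPrefixes path.toList).any (fun x => leaves.contains (String.ofList x)) := by
  rw [Bool.eq_iff_iff]
  simp only [List.any_eq_true, Bool.and_eq_true, beq_iff_eq]
  constructor
  · rintro ⟨⟨i, c⟩, hm, hc, hcon⟩
    obtain ⟨k, hk, hpair⟩ := (PySem.List.mem_enumerate_iff _ _ _).1 hm
    obtain ⟨rfl, rfl⟩ := Prod.mk.injEq .. ▸ hpair
    rw [PySem.List.slice_to _ (by omega), show ((0 : ℤ) + (k : ℤ)).toNat = k from by omega] at hcon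
    exact ⟨path.toList.take k, (mem_commaPrefixes _ _).2 ⟨k, hk, hc, rfl⟩, hcon⟩
  · rintro ⟨x, hx, hcon⟩
    obtain ⟨k, hk, hc, rfl⟩ := (mem_commaPrefixes _ _).1 hx
    refine ⟨((0 : ℤ) + (k : ℤ), path.toList[k]),
      (PySem.List.mem_enumerate_iff _ _ _).2 ⟨k, hk, rfl⟩, hc, ?_⟩
    rw [PySem.List.slice_to _ (by omega), show ((0 : ℤ) + (k : ℤ)).toNat = k from by omega]
    exact hcon

theorem node_part_of_eq (path : String) (leaves : List String) :
    node_part_of path leaves = node_part_of_alt path leaves := by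
  unfold node_part_of node_part_of_alt
  by_cases hL : leaves.length = 0
  · have : leaves = [] := List.length_eq_zero_iff.1 hL
    subst this
    simp
  · rw [if_neg hL]
    simp only [split_comma_eq, loop_eq]
    by_cases hE : (path == "" && leaves.contains "") = true
    · rw [if_pos hE]
      obtain ⟨h1, h2⟩ := Bool.and_eq_true_iff.1 hE
      rw [if_pos (by rwa [(beq_iff_eq).1 h1])]
    · rw [if_neg hE, anyB_eq, List.any_append]
      cases hcp : leaves.contains path with
      | true =>
        have hm : path ∈ leaves := by simpa using hcp
        simp [String.ofList_toList, hm]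
      | false =>
        have hm : path ∉ leaves := by simpa using hcp
        simp [String.ofList_toList, hm]

-- ===== VERDICT (by name: the statement is the Claim_ definition above) =====
theorem node_part_of_spec : Claim_equal_node_part_of := by
  intro path leaves _
  unfold Spec_node_part_of
  exact node_part_of_eq path leaves
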